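-- pv_equiv track=rewrite | github.com/liuguangxi/rosecode | Codes/rc311/rc311.py | nimber_inv
-- ===== SOURCE A (Python) =====
-- def ilog2(n):
--   return 0 if n <= 0 else n.bit_length() - 1
--
-- def nimber_lv(n):
--   if n <= 1:
--     return 0
--   return ilog2(ilog2(n)) + 1
--
-- def nimber_combine(n, a, b):
--   return (b << (1 << n)) | a
--
-- def nimber_split(n, a):
--   t = 1 << n
--   return a & ((1 << t) - 1), a >> t
--
-- def nimber_product_half(n, a):
--   if n == 0:
--     return a
--   if a == 0:
--     return 0
--   lo, hi = nimber_split(n - 1, a)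
--   lo, hi = \
--     nimber_product_half(n - 1, nimber_product_half(n - 1, hi)), \
--     nimber_product_half(n - 1, hi ^ lo)
--   return nimber_combine(n - 1, lo, hi)
--
-- def nimber_square(a):
--   if a <= 1:
--     return a
--   lv = nimber_lv(a)
--   lo, hi = nimber_split(lv - 1, a)
--   lo = nimber_square(lo)
--   hi = nimber_square(hi)
--   lo = nimber_product_half(lv - 1, hi) ^ lo
--   return nimber_combine(lv - 1, lo, hi)
--
-- def nimber_product(a, b):
--   if a == b:
--     return nimber_square(a)
--
--   if a < b:
--     a, b = b, a
--
--   if a <= 1: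
--     return a & b
--
--   lv_a = nimber_lv(a)
--   lv_b = nimber_lv(b)
--
--   a_lo, a_hi = nimber_split(lv_a - 1, a)
--   if lv_a > lv_b:
--     hi = nimber_product(a_hi, b)
--     lo = nimber_product(a_lo, b)
--     return nimber_combine(lv_a - 1, lo, hi)
--
--   b_lo, b_hi = nimber_split(lv_a - 1, b)
--   w0 = nimber_product(a_lo, b_lo)
--   w1 = nimber_product(a_lo ^ a_hi, b_lo ^ b_hi)
--   w2 = nimber_product_half(lv_a - 1, nimber_product(a_hi, b_hi))
--   return nimber_combine(lv_a - 1, w0 ^ w2, w0 ^ w1)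
--
-- def nimber_inv(n):
--   """
--   Since (hi + lo) * c + hi * d = 0 and hi * H * c + lo * d = 0,
--     c = hi * (1 / (hi * hi * H + lo * (hi + lo))) and
--     d = (hi + lo) * (1 / (hi * hi * H + lo * (hi + lo))).
--   """
--   if n <= 1:
--     return n
--   lv = nimber_lv(n)
--   lo, hi = nimber_split(lv - 1, n)
--
--   t = nimber_product(lo ^ hi, lo)
--   t ^= nimber_product_half(lv - 1, nimber_square(hi))
--   t = nimber_inv(t)
--
--   lo = nimber_product(lo ^ hi, t)
--   hi = nimber_product(hi, t)
--   return nimber_combine(lv - 1, lo, hi)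
-- ===== SOURCE B (Python) =====
-- def ilog2(n):
--   return 0 if n <= 0 else n.bit_length() - 1
--
-- def nimber_lv(n):
--   if n <= 1:
--     return 0
--   return ilog2(ilog2(n)) + 1
--
-- def nimber_combine(n, a, b):
--   return (b << (1 << n)) | a
--
-- def nimber_split(n, a):
--   t = 1 << n
--   return a & ((1 << t) - 1), a >> t
--
-- def nimber_product_half(n, a):
--   if n == 0:
--     return a
--   if a == 0:
--     return 0
--   lo, hi = nimber_split(n - 1, a)
--   lo, hi = \
--     nimber_product_half(n - 1, nimber_product_half(n - 1, hi)), \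
--     nimber_product_half(n - 1, hi ^ lo)
--   return nimber_combine(n - 1, lo, hi)
--
-- def nimber_square(a):
--   if a <= 1:
--     return a
--   lv = nimber_lv(a)
--   lo, hi = nimber_split(lv - 1, a)
--   lo = nimber_square(lo)
--   hi = nimber_square(hi)
--   lo = nimber_product_half(lv - 1, hi) ^ lo
--   return nimber_combine(lv - 1, lo, hi)
--
-- def nimber_product_memo(a, b, cache):
--   # dynamic programming: every distinct (max, min) product is computed once
--   if a < b:
--     a, b = b, a
--   key = (a, b)
--   v = cache.get(key)
--   if v is not None:
--     return v
--   if a == b: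
--     v = nimber_square(a)
--   elif a <= 1:
--     v = a & b
--   else:
--     lv_a = nimber_lv(a)
--     lv_b = nimber_lv(b)
--     a_lo, a_hi = nimber_split(lv_a - 1, a)
--     if lv_a > lv_b:
--       hi = nimber_product_memo(a_hi, b, cache)
--       lo = nimber_product_memo(a_lo, b, cache)
--       v = nimber_combine(lv_a - 1, lo, hi)
--     else:
--       b_lo, b_hi = nimber_split(lv_a - 1, b)
--       w0 = nimber_product_memo(a_lo, b_lo, cache)
--       w1 = nimber_product_memo(a_lo ^ a_hi, b_lo ^ b_hi, cache)
--       w2 = nimber_product_half(lv_a - 1, nimber_product_memo(a_hi, b_hi, cache))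
--       v = nimber_combine(lv_a - 1, w0 ^ w2, w0 ^ w1)
--   cache[key] = v
--   return v
--
-- def nimber_inv(n):
--   # Iterative: a downward pass stacks one (lv, lo, hi) frame per level, an
--   # upward pass rebuilds the inverse; all products go through one memo table.
--   if n <= 1:
--     return n
--   cache = {}
--   stack = []
--   m = n
--   while m > 1:
--     lv = nimber_lv(m)
--     lo, hi = nimber_split(lv - 1, m)
--     stack.append((lv, lo, hi))
--     m = nimber_product_memo(lo ^ hi, lo, cache) ^ \
--         nimber_product_half(lv - 1, nimber_square(hi))
--   inv = m
--   while stack: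
--     lv, lo, hi = stack.pop()
--     inv = nimber_combine(lv - 1,
--                          nimber_product_memo(lo ^ hi, inv, cache),
--                          nimber_product_memo(hi, inv, cache))
--   return inv
-- ===== Notes on version B (the rewrite author's own statement) =====
-- stated objective: alternative
-- what changed: A's self-recursive field-identity descent becomes two explicit loops (a downward pass stacking one (lv, lo, hi) frame per level, an upward pass rebuilding the inverse), and all top-level nimber products go through one memo dictionary keyed by the sorted operand pair, so every distinct product is computed once (dynamic programming) instead of being re-derived by the naive recursion.
import Mathlib
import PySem

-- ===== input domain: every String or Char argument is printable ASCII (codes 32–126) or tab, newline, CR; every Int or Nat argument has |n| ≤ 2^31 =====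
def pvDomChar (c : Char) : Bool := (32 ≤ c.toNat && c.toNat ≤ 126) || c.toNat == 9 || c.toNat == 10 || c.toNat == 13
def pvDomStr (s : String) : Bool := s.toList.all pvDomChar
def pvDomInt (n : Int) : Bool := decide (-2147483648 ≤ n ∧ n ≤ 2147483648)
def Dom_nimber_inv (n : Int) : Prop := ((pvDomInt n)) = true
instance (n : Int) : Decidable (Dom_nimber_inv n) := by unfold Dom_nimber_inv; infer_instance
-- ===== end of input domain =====

-- B replaces A's self-recursive descent by an explicit stack (downward pass pushes one
-- (lv, lo, hi) frame per level, upward pass rebuilds the inverse) and memoizes all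
-- top-level nimber products in one dict, so every distinct product is computed once
-- (objective: alternative / dynamic programming; timing on ≤2^31 inputs shows only a
-- small constant-factor gain, so no speed is claimed).

-- ===== PORT A =====
-- Shared module helpers of A. Recursions that Python bounds only by its actual call
-- pattern carry a fuel parameter large enough for every terminating run; shift counts
-- are nonnegative at every reachable call, so `.toNat` there is exact.

def pv_ilog2 (n : Int) : Int :=
  if n ≤ 0 then 0 else (PySem.Int.bitLength n : Int) - 1

def pv_nimber_lv (n : Int) : Int :=
  if n ≤ 1 then 0 else pv_ilog2 (pv_ilog2 n) + 1

def pv_nimber_combine (n a b : Int) : Int :=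
  PySem.Int.bor (b <<< ((1 : Int) <<< n.toNat).toNat) a

def pv_nimber_split (n a : Int) : Int × Int :=
  let t := ((1 : Int) <<< n.toNat).toNat
  (PySem.Int.band a (((1 : Int) <<< t) - 1), a >>> t)

-- fuel = n+1 suffices: n drops by 1 per call down to the n = 0 base case
def pv_nimber_product_half_f : Nat → Int → Int → Int
  | 0, _, a => a
  | f + 1, n, a =>
    if n = 0 then a
    else if a = 0 then 0
    else
      let p := pv_nimber_split (n - 1) a
      let lo := pv_nimber_product_half_f f (n - 1) (pv_nimber_product_half_f f (n - 1) p.2)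
      let hi := pv_nimber_product_half_f f (n - 1) (PySem.Int.bxor p.2 p.1)
      pv_nimber_combine (n - 1) lo hi

def pv_nimber_product_half (n a : Int) : Int :=
  pv_nimber_product_half_f (n.toNat + 1) n a

-- fuel = a+1 suffices: both split halves are strictly smaller than a when a ≥ 2
def pv_nimber_square_f : Nat → Int → Int
  | 0, a => a
  | f + 1, a =>
    if a ≤ 1 then a
    else
      let lv := pv_nimber_lv a
      let p := pv_nimber_split (lv - 1) a
      let lo := pv_nimber_square_f f p.1
      let hi := pv_nimber_square_f f p.2
      let lo2 := PySem.Int.bxor (pv_nimber_product_half (lv - 1) hi) lo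
      pv_nimber_combine (lv - 1) lo2 hi

def pv_nimber_square (a : Int) : Int := pv_nimber_square_f (a.toNat + 1) a

-- fuel = a+b+1 suffices: every recursive call strictly decreases a+b
def pv_nimber_product_f : Nat → Int → Int → Int
  | 0, _, _ => 0
  | f + 1, a0, b0 =>
    if a0 = b0 then pv_nimber_square a0
    else
      let a := if a0 < b0 then b0 else a0
      let b := if a0 < b0 then a0 else b0
      if a ≤ 1 then PySem.Int.band a b
      else
        let lv_a := pv_nimber_lv a
        let lv_b := pv_nimber_lv b
        let pa := pv_nimber_split (lv_a - 1) a
        if lv_a > lv_b then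
          let hi := pv_nimber_product_f f pa.2 b
          let lo := pv_nimber_product_f f pa.1 b
          pv_nimber_combine (lv_a - 1) lo hi
        else
          let pb := pv_nimber_split (lv_a - 1) b
          let w0 := pv_nimber_product_f f pa.1 pb.1
          let w1 := pv_nimber_product_f f (PySem.Int.bxor pa.1 pa.2) (PySem.Int.bxor pb.1 pb.2)
          let w2 := pv_nimber_product_half (lv_a - 1) (pv_nimber_product_f f pa.2 pb.2)
          pv_nimber_combine (lv_a - 1) (PySem.Int.bxor w0 w2) (PySem.Int.bxor w0 w1)

def pv_nimber_product (a b : Int) : Int :=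
  pv_nimber_product_f (a.toNat + b.toNat + 1) a b

-- A's recursion; fuel = n+1 suffices: the recursive argument t is strictly below n
def nimber_inv_f : Nat → Int → Int
  | 0, n => n
  | f + 1, n =>
    if n ≤ 1 then n
    else
      let lv := pv_nimber_lv n
      let p := pv_nimber_split (lv - 1) n
      let t := PySem.Int.bxor (pv_nimber_product (PySem.Int.bxor p.1 p.2) p.1)
                 (pv_nimber_product_half (lv - 1) (pv_nimber_square p.2))
      let t' := nimber_inv_f f t
      pv_nimber_combine (lv - 1) (pv_nimber_product (PySem.Int.bxor p.1 p.2) t')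
        (pv_nimber_product p.2 t')

def nimber_inv (n : Int) : Int := nimber_inv_f (n.toNat + 1) n

-- ===== PORT B =====
-- Source B's nimber_product_memo: the cache (a PySem.Dict keyed by the sorted pair) is
-- threaded through the recursion; a hit returns without recursing. Same fuel bound
-- as A's product (a hit only shortens the recursion).
def pv_product_memo_f : Nat → Int → Int → PySem.Dict (Int × Int) Int →
    Int × PySem.Dict (Int × Int) Int
  | 0, _, _, c => (0, c)
  | f + 1, a0, b0, c =>
    let a := if a0 < b0 then b0 else a0
    let b := if a0 < b0 then a0 else b0
    match c.get? (a, b) with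
    | some v => (v, c)
    | none =>
      if a = b then
        let v := pv_nimber_square a
        (v, c.insert (a, b) v)
      else if a ≤ 1 then
        let v := PySem.Int.band a b
        (v, c.insert (a, b) v)
      else
        let lv_a := pv_nimber_lv a
        let lv_b := pv_nimber_lv b
        let pa := pv_nimber_split (lv_a - 1) a
        if lv_a > lv_b then
          let rhi := pv_product_memo_f f pa.2 b c
          let rlo := pv_product_memo_f f pa.1 b rhi.2
          let v := pv_nimber_combine (lv_a - 1) rlo.1 rhi.1
          (v, rlo.2.insert (a, b) v)
        else
          let pb := pv_nimber_split (lv_a - 1) b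
          let r0 := pv_product_memo_f f pa.1 pb.1 c
          let r1 := pv_product_memo_f f (PySem.Int.bxor pa.1 pa.2) (PySem.Int.bxor pb.1 pb.2) r0.2
          let r2 := pv_product_memo_f f pa.2 pb.2 r1.2
          let w2 := pv_nimber_product_half (lv_a - 1) r2.1
          let v := pv_nimber_combine (lv_a - 1) (PySem.Int.bxor r0.1 w2)
                     (PySem.Int.bxor r0.1 r1.1)
          (v, r2.2.insert (a, b) v)

def pv_product_memo (a b : Int) (c : PySem.Dict (Int × Int) Int) :
    Int × PySem.Dict (Int × Int) Int :=
  pv_product_memo_f (a.toNat + b.toNat + 1) a b c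

-- Source B's downward while-loop: returns the final m (≤ 1), the stack of (lv, lo, hi)
-- frames in push order, and the cache after the pass; fuel as in A's recursion
def pv_inv_down : Nat → Int → PySem.Dict (Int × Int) Int →
    Int × List (Int × Int × Int) × PySem.Dict (Int × Int) Int
  | 0, m, c => (m, [], c)
  | f + 1, m, c =>
    if m ≤ 1 then (m, [], c)
    else
      let lv := pv_nimber_lv m
      let p := pv_nimber_split (lv - 1) m
      let r := pv_product_memo (PySem.Int.bxor p.1 p.2) p.1 c
      let t := PySem.Int.bxor r.1 (pv_nimber_product_half (lv - 1) (pv_nimber_square p.2))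
      let rest := pv_inv_down f t r.2
      (rest.1, (lv, p.1, p.2) :: rest.2.1, rest.2.2)

-- Source B's upward while-loop: pops frames from the end of the push-order list
-- (structural recursion processes the head frame last), threading (inv, cache)
def pv_inv_up : List (Int × Int × Int) → Int × PySem.Dict (Int × Int) Int →
    Int × PySem.Dict (Int × Int) Int
  | [], s => s
  | fr :: rest, s =>
    let s' := pv_inv_up rest s
    let r1 := pv_product_memo (PySem.Int.bxor fr.2.1 fr.2.2) s'.1 s'.2
    let r2 := pv_product_memo fr.2.2 s'.1 r1.2
    (pv_nimber_combine (fr.1 - 1) r1.1 r2.1, r2.2)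

def nimber_inv_alt (n : Int) : Int :=
  if n ≤ 1 then n
  else
    let d := pv_inv_down (n.toNat + 1) n PySem.Dict.empty
    (pv_inv_up d.2.1 (d.1, d.2.2)).1

-- ===== PRECONDITION & SPEC =====
def Spec_nimber_inv (n : Int) (out : Int) : Prop := out = nimber_inv_alt n
instance (n : Int) (out : Int) : Decidable (Spec_nimber_inv n out) := by unfold Spec_nimber_inv; infer_instance

-- ===== CLAIM (what is proved, stated in full; the proofs are below) =====
def Claim_equal_nimber_inv : Prop := ∀ (n : Int), Dom_nimber_inv n → Spec_nimber_inv n (nimber_inv n)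

-- ===== LEMMAS AND PROOFS =====

theorem pv_shl_one (k : Nat) : ((1 : Int) <<< k) = ((2 ^ k : Nat) : Int) := by
  rw [Int.shiftLeft_eq]; push_cast; ring

theorem pv_split_eq (w x : Int) (_hw : 0 ≤ w) (hx : 0 ≤ x) :
    pv_nimber_split w x =
      (((x.toNat % 2 ^ 2 ^ w.toNat : Nat) : Int), ((x.toNat / 2 ^ 2 ^ w.toNat : Nat) : Int)) := by
  have ht : (((1 : Int) <<< w.toNat).toNat) = 2 ^ w.toNat := by
    rw [pv_shl_one]; exact Int.toNat_natCast _
  unfold pv_nimber_split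
  simp only [ht]
  refine Prod.ext ?_ ?_ <;> simp only []
  · have hm : ((1 : Int) <<< (2 ^ w.toNat : Nat)) - 1 = ((2 ^ 2 ^ w.toNat - 1 : Nat) : Int) := by
      rw [pv_shl_one, Nat.cast_sub Nat.one_le_two_pow]; norm_num
    rw [hm]
    conv_lhs => rw [← Int.toNat_of_nonneg hx]
    rw [PySem.Int.band_natCast, Nat.and_two_pow_sub_one_eq_mod]
  · rw [Int.shiftRight_eq_div_pow]
    conv_lhs => rw [← Int.toNat_of_nonneg hx]
    push_cast
    exact (Int.ofNat_ediv_ofNat).symm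

theorem pv_lv_T (a : Int) (ha : 2 ≤ a) :
    1 ≤ pv_nimber_lv a ∧
    (2 : Int) ^ 2 ^ (pv_nimber_lv a - 1).toNat ≤ a ∧
    a < 2 ^ 2 ^ (pv_nimber_lv a - 1).toNat * 2 ^ 2 ^ (pv_nimber_lv a - 1).toNat := by
  obtain ⟨L, hLdef⟩ : ∃ L, PySem.Int.bitLength a = L := ⟨_, rfl⟩
  have hA2 : a.toNat < 2 ^ L := by
    have := PySem.Int.lt_two_pow_bitLength a; rw [hLdef] at this; omega
  have hA1 : 2 ^ (L - 1) ≤ a.toNat := by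
    have := PySem.Int.two_pow_bitLength_le a (by omega); rw [hLdef] at this; omega
  have hL2 : 2 ≤ L := by
    by_contra h
    have h0 : L ≤ 1 := by omega
    have : (2:Nat) ^ L ≤ 2 := by
      calc (2:Nat) ^ L ≤ 2 ^ 1 := Nat.pow_le_pow_right (by omega) h0
      _ = 2 := by norm_num
    omega
  have hx1 : pv_ilog2 a = ((L - 1 : Nat) : Int) := by
    unfold pv_ilog2
    rw [if_neg (by omega), hLdef]
    push_cast [Nat.cast_sub (by omega : 1 ≤ L)]; ring
  obtain ⟨M, hMdef⟩ : ∃ M, PySem.Int.bitLength ((L - 1 : Nat) : Int) = M := ⟨_, rfl⟩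
  have hB2' : L - 1 < 2 ^ M := by
    have := PySem.Int.lt_two_pow_bitLength ((L - 1 : Nat) : Int)
    rw [hMdef] at this; simpa using this
  have hB1 : 2 ^ (M - 1) ≤ L - 1 := by
    have := PySem.Int.two_pow_bitLength_le ((L - 1 : Nat) : Int) (by
      simp only [ne_eq, Nat.cast_eq_zero]; omega)
    rw [hMdef] at this; simpa using this
  have hM1 : 1 ≤ M := by
    by_contra h
    have h0 : M = 0 := by omega
    rw [h0] at hB2'; simp at hB2'; omega
  have hlv : pv_nimber_lv a = (M : Int) := by
    unfold pv_nimber_lv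
    rw [if_neg (by omega), hx1]
    unfold pv_ilog2
    rw [if_neg (by omega), hMdef]; ring
  have hk : (pv_nimber_lv a - 1).toNat = M - 1 := by rw [hlv]; omega
  have h2M : (2:Nat) ^ (M - 1) * 2 = 2 ^ M := by
    rw [← pow_succ, Nat.sub_add_cancel hM1]
  have hsum : (2:Nat) ^ (M - 1) + 2 ^ (M - 1) = 2 ^ M := by omega
  refine ⟨by omega, ?_, ?_⟩
  · rw [hk]
    have h1 : (2:Nat) ^ 2 ^ (M - 1) ≤ a.toNat :=
      le_trans (Nat.pow_le_pow_right (by omega) (by omega)) hA1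
    calc (2:Int) ^ 2 ^ (M-1) = ((2 ^ 2 ^ (M-1) : Nat) : Int) := by push_cast; ring
    _ ≤ ((a.toNat : Nat) : Int) := by exact_mod_cast h1
    _ = a := Int.toNat_of_nonneg (by omega)
  · rw [hk]
    have h1 : a.toNat < 2 ^ (2 ^ M) :=
      lt_of_lt_of_le hA2 (Nat.pow_le_pow_right (by omega) (by omega))
    calc a = ((a.toNat : Nat) : Int) := (Int.toNat_of_nonneg (by omega)).symm
    _ < ((2 ^ (2 ^ M) : Nat) : Int) := by exact_mod_cast h1
    _ = 2 ^ 2 ^ (M-1) * 2 ^ 2 ^ (M-1) := by rw [← hsum]; push_cast [pow_add]; ring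

theorem pv_split_bounds (w x : Int) (hw : 0 ≤ w) (hx0 : 0 ≤ x)
    (hxU : x < 2 ^ 2 ^ w.toNat * 2 ^ 2 ^ w.toNat) :
    0 ≤ (pv_nimber_split w x).1 ∧ (pv_nimber_split w x).1 < 2 ^ 2 ^ w.toNat ∧
    0 ≤ (pv_nimber_split w x).2 ∧ (pv_nimber_split w x).2 < 2 ^ 2 ^ w.toNat := by
  rw [pv_split_eq w x hw hx0]
  dsimp only
  have hTc : ((2 ^ 2 ^ w.toNat : Nat) : Int) = (2 : Int) ^ 2 ^ w.toNat := by push_cast; ring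
  have hT0 : (0:Nat) < 2 ^ 2 ^ w.toNat := by positivity
  have hxU' : x.toNat < 2 ^ 2 ^ w.toNat * 2 ^ 2 ^ w.toNat := by
    have : x = ((x.toNat : Nat) : Int) := (Int.toNat_of_nonneg hx0).symm
    rw [this, ← hTc] at hxU
    exact_mod_cast hxU
  refine ⟨by positivity, ?_, by positivity, ?_⟩
  · rw [← hTc]; exact_mod_cast Nat.mod_lt x.toNat hT0
  · rw [← hTc]
    have : x.toNat / 2 ^ 2 ^ w.toNat < 2 ^ 2 ^ w.toNat :=
      Nat.div_lt_of_lt_mul hxU'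
    exact_mod_cast this

theorem pv_bxor_nonneg (a b : Int) (ha : 0 ≤ a) (hb : 0 ≤ b) : 0 ≤ PySem.Int.bxor a b := by
  rw [PySem.Int.bxor_of_nonneg ha hb]; positivity

theorem pv_bxor_lt (x y : Int) (n : Nat) (hx0 : 0 ≤ x) (hy0 : 0 ≤ y)
    (hx : x < (2 : Int) ^ n) (hy : y < (2 : Int) ^ n) : PySem.Int.bxor x y < 2 ^ n := by
  rw [PySem.Int.bxor_of_nonneg hx0 hy0]
  have hx' : x.toNat < 2 ^ n := by
    have : x = ((x.toNat : Nat) : Int) := (Int.toNat_of_nonneg hx0).symm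
    rw [this] at hx; exact_mod_cast hx
  have hy' : y.toNat < 2 ^ n := by
    have : y = ((y.toNat : Nat) : Int) := (Int.toNat_of_nonneg hy0).symm
    rw [this] at hy; exact_mod_cast hy
  exact_mod_cast Nat.xor_lt_two_pow hx' hy'

theorem pv_combine_nonneg (n lo hi : Int) (hlo : 0 ≤ lo) (hhi : 0 ≤ hi) :
    0 ≤ pv_nimber_combine n lo hi := by
  unfold pv_nimber_combine
  have h1 : 0 ≤ hi <<< ((1 : Int) <<< n.toNat).toNat := by
    rw [Int.shiftLeft_eq]; positivity
  rw [PySem.Int.bor_of_nonneg h1 hlo]; positivity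

theorem pv_split_nonneg (w x : Int) (hx : 0 ≤ x) :
    0 ≤ (pv_nimber_split w x).1 ∧ 0 ≤ (pv_nimber_split w x).2 := by
  unfold pv_nimber_split
  dsimp only
  refine ⟨PySem.Int.band_nonneg_of_nonneg_left _ hx, ?_⟩
  rw [Int.shiftRight_eq_div_pow]
  exact Int.ediv_nonneg hx (by positivity)

theorem pv_half_f_nonneg (f : Nat) (n a : Int) (ha : 0 ≤ a) :
    0 ≤ pv_nimber_product_half_f f n a := by
  induction f generalizing n a with
  | zero => simpa [pv_nimber_product_half_f]
  | succ f ih =>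
    simp only [pv_nimber_product_half_f]
    split_ifs with h1 h2
    · exact ha
    · omega
    · exact pv_combine_nonneg _ _ _
        (ih _ _ (ih _ _ (pv_split_nonneg _ _ ha).2))
        (ih _ _ (pv_bxor_nonneg _ _ (pv_split_nonneg _ _ ha).2 (pv_split_nonneg _ _ ha).1))

theorem pv_half_nonneg (n a : Int) (ha : 0 ≤ a) : 0 ≤ pv_nimber_product_half n a :=
  pv_half_f_nonneg _ _ _ ha

theorem pv_square_f_nonneg (f : Nat) (a : Int) (ha : 0 ≤ a) :
    0 ≤ pv_nimber_square_f f a := by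
  induction f generalizing a with
  | zero => simpa [pv_nimber_square_f]
  | succ f ih =>
    simp only [pv_nimber_square_f]
    split_ifs with h1
    · exact ha
    · exact pv_combine_nonneg _ _ _
        (pv_bxor_nonneg _ _ (pv_half_nonneg _ _ (ih _ (pv_split_nonneg _ _ ha).2))
          (ih _ (pv_split_nonneg _ _ ha).1))
        (ih _ (pv_split_nonneg _ _ ha).2)

theorem pv_square_nonneg (a : Int) (ha : 0 ≤ a) : 0 ≤ pv_nimber_square a :=
  pv_square_f_nonneg _ _ ha

theorem pv_band_nonneg (a b : Int) (ha : 0 ≤ a) : 0 ≤ PySem.Int.band a b :=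
  PySem.Int.band_nonneg_of_nonneg_left _ ha

theorem pv_product_f_nonneg (f : Nat) (a b : Int) (ha : 0 ≤ a) (hb : 0 ≤ b) :
    0 ≤ pv_nimber_product_f f a b := by
  induction f generalizing a b with
  | zero => simp [pv_nimber_product_f]
  | succ f ih =>
    simp only [pv_nimber_product_f]
    split_ifs <;>
    repeat'
      first
        | omega
        | exact (pv_split_nonneg _ _ (by omega)).1
        | exact (pv_split_nonneg _ _ (by omega)).2
        | apply pv_combine_nonneg
        | apply pv_bxor_nonneg
        | apply pv_half_nonneg
        | apply pv_square_nonneg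
        | apply pv_band_nonneg
        | apply ih

theorem pv_product_nonneg (a b : Int) (ha : 0 ≤ a) (hb : 0 ≤ b) :
    0 ≤ pv_nimber_product a b := pv_product_f_nonneg _ _ _ ha hb

theorem pv_f_swap (f : Nat) (a b : Int) :
    pv_nimber_product_f (f + 1) a b = pv_nimber_product_f (f + 1) b a := by
  by_cases h : a = b
  · rw [h]
  · simp only [pv_nimber_product_f, if_neg h, if_neg (Ne.symm h)]
    rcases lt_trichotomy a b with hlt | heq | hgt
    · simp only [if_pos hlt, if_neg (not_lt.mpr (le_of_lt hlt))]
    · exact absurd heq h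
    · simp only [if_neg (not_lt.mpr (le_of_lt hgt)), if_pos hgt]

theorem pv_product_f_fuel (f g : Nat) (a b : Int) (ha : 0 ≤ a) (hb : 0 ≤ b)
    (hf : a.toNat + b.toNat < f) (hg : a.toNat + b.toNat < g) :
    pv_nimber_product_f f a b = pv_nimber_product_f g a b := by
  induction f generalizing g a b with
  | zero => omega
  | succ f ih =>
    cases g with
    | zero => omega
    | succ g =>
      by_cases h1 : a = b
      · subst h1; simp [pv_nimber_product_f]
      · suffices hs : ∀ A B : Int, 0 ≤ B → B < A →
            A.toNat + B.toNat < f + 1 → A.toNat + B.toNat < g + 1 →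
            pv_nimber_product_f (f + 1) A B = pv_nimber_product_f (g + 1) A B by
          rcases lt_or_gt_of_ne h1 with hlt | hgt
          · rw [pv_f_swap f a b, pv_f_swap g a b]
            exact hs b a ha hlt (by omega) (by omega)
          · exact hs a b hb hgt (by omega) (by omega)
        intro A B hB hBA hfA hgA
        have hA0 : 0 ≤ A := by omega
        simp only [pv_nimber_product_f, if_neg (by omega : ¬ A = B),
          if_neg (not_lt.mpr (le_of_lt hBA))]
        by_cases hA1 : A ≤ 1
        · simp only [if_pos hA1]
        · simp only [if_neg hA1]
          have hA2 : 2 ≤ A := by omega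
          obtain ⟨hlv1, hTle, hTlt⟩ := pv_lv_T A hA2
          have hw0 : (0:Int) ≤ pv_nimber_lv A - 1 := by omega
          obtain ⟨hpa1n, hpa1u, hpa2n, hpa2u⟩ :=
            pv_split_bounds (pv_nimber_lv A - 1) A hw0 hA0 hTlt
          by_cases hgt2 : pv_nimber_lv A > pv_nimber_lv B
          · simp only [if_pos hgt2]
            rw [ih g (pv_nimber_split (pv_nimber_lv A - 1) A).2 B hpa2n hB
                (by omega) (by omega),
              ih g (pv_nimber_split (pv_nimber_lv A - 1) A).1 B hpa1n hB
                (by omega) (by omega)]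
          · simp only [if_neg hgt2]
            have hlvB : pv_nimber_lv A ≤ pv_nimber_lv B := not_lt.mp hgt2
            have hB2 : 2 ≤ B := by
              by_contra h
              have hb1 : B ≤ 1 := by omega
              have : pv_nimber_lv B = 0 := by unfold pv_nimber_lv; rw [if_pos hb1]
              omega
            obtain ⟨hlvB1, hTBle, hTBlt⟩ := pv_lv_T B hB2
            have hexp : (pv_nimber_lv A - 1).toNat ≤ (pv_nimber_lv B - 1).toNat := by omega
            have hTAB : (2:Int) ^ 2 ^ (pv_nimber_lv A - 1).toNat ≤
                2 ^ 2 ^ (pv_nimber_lv B - 1).toNat :=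
              pow_le_pow_right₀ (by norm_num) (Nat.pow_le_pow_right (by norm_num) hexp)
            have hTleB : (2:Int) ^ 2 ^ (pv_nimber_lv A - 1).toNat ≤ B := le_trans hTAB hTBle
            have hBlt : B < 2 ^ 2 ^ (pv_nimber_lv A - 1).toNat *
                2 ^ 2 ^ (pv_nimber_lv A - 1).toNat := lt_trans hBA hTlt
            obtain ⟨hpb1n, hpb1u, hpb2n, hpb2u⟩ :=
              pv_split_bounds (pv_nimber_lv A - 1) B hw0 (by omega) hBlt
            have hxa := pv_bxor_lt _ _ _ hpa1n hpa2n hpa1u hpa2u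
            have hxb := pv_bxor_lt _ _ _ hpb1n hpb2n hpb1u hpb2u
            have hxan := pv_bxor_nonneg _ _ hpa1n hpa2n
            have hxbn := pv_bxor_nonneg _ _ hpb1n hpb2n
            rw [ih g (pv_nimber_split (pv_nimber_lv A - 1) A).1
                  (pv_nimber_split (pv_nimber_lv A - 1) B).1 hpa1n hpb1n
                  (by omega) (by omega),
              ih g (PySem.Int.bxor (pv_nimber_split (pv_nimber_lv A - 1) A).1
                    (pv_nimber_split (pv_nimber_lv A - 1) A).2)
                  (PySem.Int.bxor (pv_nimber_split (pv_nimber_lv A - 1) B).1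
                    (pv_nimber_split (pv_nimber_lv A - 1) B).2) hxan hxbn
                  (by omega) (by omega),
              ih g (pv_nimber_split (pv_nimber_lv A - 1) A).2
                  (pv_nimber_split (pv_nimber_lv A - 1) B).2 hpa2n hpb2n
                  (by omega) (by omega)]

theorem pv_product_eq_fuel (f : Nat) (a b : Int) (ha : 0 ≤ a) (hb : 0 ≤ b)
    (hf : a.toNat + b.toNat < f) :
    pv_nimber_product_f f a b = pv_nimber_product a b :=
  pv_product_f_fuel f (a.toNat + b.toNat + 1) a b ha hb hf (by omega)

theorem pv_product_swap (a b : Int) : pv_nimber_product a b = pv_nimber_product b a := by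
  unfold pv_nimber_product
  rw [Nat.add_comm a.toNat b.toNat]
  exact pv_f_swap _ a b

-- cache invariant: every stored value is the nimber product of its key
def CacheGood (c : PySem.Dict (Int × Int) Int) : Prop :=
  ∀ k v, c.get? k = some v → v = pv_nimber_product k.1 k.2

theorem pv_branch_facts (A B : Int) (hB0 : 0 ≤ B) (hBA : B < A) (hA2 : 2 ≤ A) :
    (0 ≤ pv_nimber_lv A - 1) ∧
    0 ≤ (pv_nimber_split (pv_nimber_lv A - 1) A).1 ∧
    (pv_nimber_split (pv_nimber_lv A - 1) A).1 < A ∧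
    0 ≤ (pv_nimber_split (pv_nimber_lv A - 1) A).2 ∧
    (pv_nimber_split (pv_nimber_lv A - 1) A).2 < A ∧
    (¬ pv_nimber_lv A > pv_nimber_lv B →
      0 ≤ (pv_nimber_split (pv_nimber_lv A - 1) B).1 ∧
      (pv_nimber_split (pv_nimber_lv A - 1) B).1 < B ∧
      0 ≤ (pv_nimber_split (pv_nimber_lv A - 1) B).2 ∧
      (pv_nimber_split (pv_nimber_lv A - 1) B).2 < B ∧
      0 ≤ PySem.Int.bxor (pv_nimber_split (pv_nimber_lv A - 1) A).1
            (pv_nimber_split (pv_nimber_lv A - 1) A).2 ∧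
      PySem.Int.bxor (pv_nimber_split (pv_nimber_lv A - 1) A).1
        (pv_nimber_split (pv_nimber_lv A - 1) A).2 < A ∧
      0 ≤ PySem.Int.bxor (pv_nimber_split (pv_nimber_lv A - 1) B).1
            (pv_nimber_split (pv_nimber_lv A - 1) B).2 ∧
      PySem.Int.bxor (pv_nimber_split (pv_nimber_lv A - 1) B).1
        (pv_nimber_split (pv_nimber_lv A - 1) B).2 < B) := by
  have hA0 : (0:Int) ≤ A := by omega
  obtain ⟨hlv1, hTle, hTlt⟩ := pv_lv_T A hA2
  have hw0 : (0:Int) ≤ pv_nimber_lv A - 1 := by omega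
  obtain ⟨hpa1n, hpa1u, hpa2n, hpa2u⟩ := pv_split_bounds (pv_nimber_lv A - 1) A hw0 hA0 hTlt
  refine ⟨hw0, hpa1n, by omega, hpa2n, by omega, ?_⟩
  intro hgt2
  have hlvB : pv_nimber_lv A ≤ pv_nimber_lv B := not_lt.mp hgt2
  have hB2 : 2 ≤ B := by
    by_contra h
    have hb1 : B ≤ 1 := by omega
    have : pv_nimber_lv B = 0 := by unfold pv_nimber_lv; rw [if_pos hb1]
    omega
  obtain ⟨hlvB1, hTBle, hTBlt⟩ := pv_lv_T B hB2
  have hexp : (pv_nimber_lv A - 1).toNat ≤ (pv_nimber_lv B - 1).toNat := by omega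
  have hTAB : (2:Int) ^ 2 ^ (pv_nimber_lv A - 1).toNat ≤
      2 ^ 2 ^ (pv_nimber_lv B - 1).toNat :=
    pow_le_pow_right₀ (by norm_num) (Nat.pow_le_pow_right (by norm_num) hexp)
  have hTleB : (2:Int) ^ 2 ^ (pv_nimber_lv A - 1).toNat ≤ B := le_trans hTAB hTBle
  have hBlt : B < 2 ^ 2 ^ (pv_nimber_lv A - 1).toNat *
      2 ^ 2 ^ (pv_nimber_lv A - 1).toNat := lt_trans hBA hTlt
  obtain ⟨hpb1n, hpb1u, hpb2n, hpb2u⟩ := pv_split_bounds (pv_nimber_lv A - 1) B hw0 (by omega) hBlt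
  have hxa := pv_bxor_lt _ _ _ hpa1n hpa2n hpa1u hpa2u
  have hxb := pv_bxor_lt _ _ _ hpb1n hpb2n hpb1u hpb2u
  have hxan := pv_bxor_nonneg _ _ hpa1n hpa2n
  have hxbn := pv_bxor_nonneg _ _ hpb1n hpb2n
  exact ⟨hpb1n, by omega, hpb2n, by omega, hxan, by omega, hxbn, by omega⟩

theorem pv_product_self (A : Int) : pv_nimber_product A A = pv_nimber_square A := by
  unfold pv_nimber_product
  simp [pv_nimber_product_f]

theorem pv_product_low (A B : Int) (hne : ¬ A = B) (hnl : ¬ A < B) (h1 : A ≤ 1) :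
    pv_nimber_product A B = PySem.Int.band A B := by
  unfold pv_nimber_product
  simp only [pv_nimber_product_f, if_neg hne, if_neg hnl, if_pos h1]

theorem pv_product_unfold_sorted (A B : Int) (hB0 : 0 ≤ B) (hBA : B < A) (hA2 : 2 ≤ A) :
    pv_nimber_product A B =
      if pv_nimber_lv A > pv_nimber_lv B then
        pv_nimber_combine (pv_nimber_lv A - 1)
          (pv_nimber_product (pv_nimber_split (pv_nimber_lv A - 1) A).1 B)
          (pv_nimber_product (pv_nimber_split (pv_nimber_lv A - 1) A).2 B)
      else
        pv_nimber_combine (pv_nimber_lv A - 1)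
          (PySem.Int.bxor
            (pv_nimber_product (pv_nimber_split (pv_nimber_lv A - 1) A).1
              (pv_nimber_split (pv_nimber_lv A - 1) B).1)
            (pv_nimber_product_half (pv_nimber_lv A - 1)
              (pv_nimber_product (pv_nimber_split (pv_nimber_lv A - 1) A).2
                (pv_nimber_split (pv_nimber_lv A - 1) B).2)))
          (PySem.Int.bxor
            (pv_nimber_product (pv_nimber_split (pv_nimber_lv A - 1) A).1
              (pv_nimber_split (pv_nimber_lv A - 1) B).1)
            (pv_nimber_product
              (PySem.Int.bxor (pv_nimber_split (pv_nimber_lv A - 1) A).1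
                (pv_nimber_split (pv_nimber_lv A - 1) A).2)
              (PySem.Int.bxor (pv_nimber_split (pv_nimber_lv A - 1) B).1
                (pv_nimber_split (pv_nimber_lv A - 1) B).2))) := by
  obtain ⟨hw0, hpa1n, hpa1u, hpa2n, hpa2u, hrest⟩ := pv_branch_facts A B hB0 hBA hA2
  conv_lhs => rw [pv_nimber_product]
  simp only [pv_nimber_product_f, if_neg (by omega : ¬ A = B),
    if_neg (not_lt.mpr (le_of_lt hBA)), if_neg (by omega : ¬ A ≤ 1)]
  by_cases hgt : pv_nimber_lv A > pv_nimber_lv B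
  · simp only [if_pos hgt]
    rw [pv_product_eq_fuel _ _ _ hpa2n hB0 (by omega),
      pv_product_eq_fuel _ _ _ hpa1n hB0 (by omega)]
  · obtain ⟨hpb1n, hpb1u, hpb2n, hpb2u, hxan, hxau, hxbn, hxbu⟩ := hrest hgt
    simp only [if_neg hgt]
    rw [pv_product_eq_fuel _ _ _ hpa1n hpb1n (by omega),
      pv_product_eq_fuel _ _ _ hxan hxbn (by omega),
      pv_product_eq_fuel _ _ _ hpa2n hpb2n (by omega)]

theorem pv_cache_insert (c : PySem.Dict (Int × Int) Int) (hc : CacheGood c)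
    (k1 k2 v : Int) (hv : v = pv_nimber_product k1 k2) :
    CacheGood (c.insert (k1, k2) v) := by
  intro k w h
  rw [PySem.Dict.get?_insert] at h
  split_ifs at h with hk
  · cases h; subst hk; exact hv
  · exact hc k w h

theorem pv_memo_swap (f : Nat) (a b : Int) (c : PySem.Dict (Int × Int) Int) :
    pv_product_memo_f (f + 1) a b c = pv_product_memo_f (f + 1) b a c := by
  by_cases h : a = b
  · rw [h]
  · simp only [pv_product_memo_f]
    rcases lt_trichotomy a b with hlt | heq | hgt
    · simp only [if_pos hlt, if_neg (not_lt.mpr (le_of_lt hlt))]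
    · exact absurd heq h
    · simp only [if_neg (not_lt.mpr (le_of_lt hgt)), if_pos hgt]

theorem pv_memo_f_spec (f : Nat) (a b : Int) (c : PySem.Dict (Int × Int) Int)
    (ha : 0 ≤ a) (hb : 0 ≤ b) (hf : a.toNat + b.toNat < f) (hc : CacheGood c) :
    (pv_product_memo_f f a b c).1 = pv_nimber_product a b ∧
    CacheGood (pv_product_memo_f f a b c).2 := by
  induction f generalizing a b c with
  | zero => omega
  | succ f ih =>
    suffices hs : ∀ A B : Int, ∀ c : PySem.Dict (Int × Int) Int, 0 ≤ B → B ≤ A →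
        A.toNat + B.toNat < f + 1 → CacheGood c →
        (pv_product_memo_f (f + 1) A B c).1 = pv_nimber_product A B ∧
        CacheGood (pv_product_memo_f (f + 1) A B c).2 by
      rcases (by omega : b ≤ a ∨ a < b) with hba | hab
      · exact hs a b c hb hba hf hc
      · rw [pv_memo_swap f a b c, pv_product_swap a b]
        exact hs b a c ha (le_of_lt hab) (by omega) hc
    intro A B c hB0 hBA hfA hcg
    have hA0 : (0:Int) ≤ A := by omega
    simp only [pv_product_memo_f, if_neg (not_lt.mpr hBA)]
    rcases hget : c.get? (A, B) with _ | v
    case some => exact ⟨hcg (A, B) v hget, hcg⟩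
    · by_cases hAB : A = B
      · subst hAB
        simp only [if_pos]
        exact ⟨(pv_product_self A).symm,
          pv_cache_insert c hcg A A _ (pv_product_self A).symm⟩
      · simp only [if_neg hAB]
        by_cases hA1 : A ≤ 1
        · simp only [if_pos hA1]
          have hlow := pv_product_low A B hAB (not_lt.mpr hBA) hA1
          exact ⟨hlow.symm, pv_cache_insert c hcg A B _ hlow.symm⟩
        · simp only [if_neg hA1]
          have hA2 : (2:Int) ≤ A := by omega
          have hBA' : B < A := lt_of_le_of_ne hBA (fun h => hAB h.symm)
          obtain ⟨hw0, hpa1n, hpa1u, hpa2n, hpa2u, hrest⟩ := pv_branch_facts A B hB0 hBA' hA2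
          have hunf := pv_product_unfold_sorted A B hB0 hBA' hA2
          by_cases hgt : pv_nimber_lv A > pv_nimber_lv B
          · simp only [if_pos hgt]
            obtain ⟨e1, g1⟩ := ih (pv_nimber_split (pv_nimber_lv A - 1) A).2 B c
              hpa2n hB0 (by omega) hcg
            obtain ⟨e2, g2⟩ := ih (pv_nimber_split (pv_nimber_lv A - 1) A).1 B _
              hpa1n hB0 (by omega) g1
            have hv : pv_nimber_combine (pv_nimber_lv A - 1)
                (pv_product_memo_f f (pv_nimber_split (pv_nimber_lv A - 1) A).1 B
                  (pv_product_memo_f f (pv_nimber_split (pv_nimber_lv A - 1) A).2 B c).2).1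
                (pv_product_memo_f f (pv_nimber_split (pv_nimber_lv A - 1) A).2 B c).1
                = pv_nimber_product A B := by
              rw [e1, e2, hunf, if_pos hgt]
            exact ⟨hv, pv_cache_insert _ g2 A B _ hv⟩
          · simp only [if_neg hgt]
            obtain ⟨hpb1n, hpb1u, hpb2n, hpb2u, hxan, hxau, hxbn, hxbu⟩ := hrest hgt
            obtain ⟨e0, g0⟩ := ih (pv_nimber_split (pv_nimber_lv A - 1) A).1
              (pv_nimber_split (pv_nimber_lv A - 1) B).1 c hpa1n hpb1n (by omega) hcg
            obtain ⟨e1, g1⟩ := ih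
              (PySem.Int.bxor (pv_nimber_split (pv_nimber_lv A - 1) A).1
                (pv_nimber_split (pv_nimber_lv A - 1) A).2)
              (PySem.Int.bxor (pv_nimber_split (pv_nimber_lv A - 1) B).1
                (pv_nimber_split (pv_nimber_lv A - 1) B).2) _ hxan hxbn (by omega) g0
            obtain ⟨e2, g2⟩ := ih (pv_nimber_split (pv_nimber_lv A - 1) A).2
              (pv_nimber_split (pv_nimber_lv A - 1) B).2 _ hpa2n hpb2n (by omega) g1
            refine ⟨?_, ?_⟩
            · rw [e0, e1, e2, hunf, if_neg hgt]
            · apply pv_cache_insert _ g2 A B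
              rw [e0, e1, e2, hunf, if_neg hgt]

-- pure (cache-free) versions of B's two loops, used only to state the simulation
def pv_inv_down_pure : Nat → Int → Int × List (Int × Int × Int)
  | 0, m => (m, [])
  | f + 1, m =>
    if m ≤ 1 then (m, [])
    else
      let lv := pv_nimber_lv m
      let p := pv_nimber_split (lv - 1) m
      let t := PySem.Int.bxor (pv_nimber_product (PySem.Int.bxor p.1 p.2) p.1)
                 (pv_nimber_product_half (lv - 1) (pv_nimber_square p.2))
      let r := pv_inv_down_pure f t
      (r.1, (lv, p.1, p.2) :: r.2)

def pv_inv_up_pure : List (Int × Int × Int) → Int → Int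
  | [], v => v
  | fr :: rest, v =>
    let v' := pv_inv_up_pure rest v
    pv_nimber_combine (fr.1 - 1) (pv_nimber_product (PySem.Int.bxor fr.2.1 fr.2.2) v')
      (pv_nimber_product fr.2.2 v')

theorem pv_inv_f_eq_pure (f : Nat) (n : Int) :
    nimber_inv_f f n = pv_inv_up_pure (pv_inv_down_pure f n).2 (pv_inv_down_pure f n).1 := by
  induction f generalizing n with
  | zero => simp [nimber_inv_f, pv_inv_down_pure, pv_inv_up_pure]
  | succ f ih =>
    by_cases h : n ≤ 1
    · simp [nimber_inv_f, pv_inv_down_pure, pv_inv_up_pure, h]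
    · simp only [nimber_inv_f, pv_inv_down_pure, h]
      simp [pv_inv_up_pure, ih]

theorem pv_cache_empty : CacheGood PySem.Dict.empty := by
  intro k v h
  rw [PySem.Dict.get?_empty] at h
  cases h

theorem pv_memo_spec (a b : Int) (c : PySem.Dict (Int × Int) Int)
    (ha : 0 ≤ a) (hb : 0 ≤ b) (hc : CacheGood c) :
    (pv_product_memo a b c).1 = pv_nimber_product a b ∧
    CacheGood (pv_product_memo a b c).2 :=
  pv_memo_f_spec (a.toNat + b.toNat + 1) a b c ha hb (by omega) hc

theorem pv_inv_down_sim (f : Nat) (m : Int) (c : PySem.Dict (Int × Int) Int)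
    (hm : 0 ≤ m) (hc : CacheGood c) :
    (pv_inv_down f m c).1 = (pv_inv_down_pure f m).1 ∧
    (pv_inv_down f m c).2.1 = (pv_inv_down_pure f m).2 ∧
    CacheGood (pv_inv_down f m c).2.2 ∧
    0 ≤ (pv_inv_down f m c).1 ∧
    (∀ fr ∈ (pv_inv_down f m c).2.1, 0 ≤ fr.2.1 ∧ 0 ≤ fr.2.2) := by
  induction f generalizing m c with
  | zero =>
    refine ⟨rfl, rfl, hc, hm, ?_⟩
    intro fr hfr
    simp [pv_inv_down] at hfr
  | succ f ih =>
    by_cases h : m ≤ 1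
    · refine ⟨?_, ?_, ?_, ?_, ?_⟩ <;>
        simp only [pv_inv_down, pv_inv_down_pure, if_pos h] <;>
        first
          | exact hc
          | exact hm
          | simp
    · simp only [pv_inv_down, pv_inv_down_pure, if_neg h]
      have hsp := pv_split_nonneg (pv_nimber_lv m - 1) m hm
      have hxn := pv_bxor_nonneg _ _ hsp.1 hsp.2
      obtain ⟨hm1, hmg⟩ := pv_memo_spec _ _ c hxn hsp.1 hc
      have ht0 : 0 ≤ PySem.Int.bxor
          (pv_product_memo (PySem.Int.bxor (pv_nimber_split (pv_nimber_lv m - 1) m).1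
            (pv_nimber_split (pv_nimber_lv m - 1) m).2)
            (pv_nimber_split (pv_nimber_lv m - 1) m).1 c).1
          (pv_nimber_product_half (pv_nimber_lv m - 1)
            (pv_nimber_square (pv_nimber_split (pv_nimber_lv m - 1) m).2)) := by
        rw [hm1]
        exact pv_bxor_nonneg _ _ (pv_product_nonneg _ _ hxn hsp.1)
          (pv_half_nonneg _ _ (pv_square_nonneg _ hsp.2))
      obtain ⟨i1, i2, i3, i4, i5⟩ := ih _ _ ht0 hmg
      refine ⟨?_, ?_, i3, i4, ?_⟩
      · rw [i1, hm1]
      · simp only [List.cons.injEq]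
        refine ⟨by simp, by rw [i2, hm1]⟩
      · intro fr hfr
        rcases List.mem_cons.mp hfr with hfr | hfr
        · rw [hfr]; exact ⟨hsp.1, hsp.2⟩
        · exact i5 fr hfr

theorem pv_inv_up_sim (frames : List (Int × Int × Int)) (v : Int)
    (c : PySem.Dict (Int × Int) Int) (hv : 0 ≤ v) (hc : CacheGood c)
    (hfr : ∀ fr ∈ frames, 0 ≤ fr.2.1 ∧ 0 ≤ fr.2.2) :
    (pv_inv_up frames (v, c)).1 = pv_inv_up_pure frames v ∧
    CacheGood (pv_inv_up frames (v, c)).2 ∧ 0 ≤ (pv_inv_up frames (v, c)).1 := by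
  induction frames with
  | nil => exact ⟨rfl, hc, hv⟩
  | cons fr rest ih =>
    obtain ⟨i1, i2, i3⟩ := ih (fun x hx => hfr x (List.mem_cons_of_mem _ hx))
    obtain ⟨hlo, hhi⟩ := hfr fr (List.mem_cons_self)
    have hxn := pv_bxor_nonneg _ _ hlo hhi
    simp only [pv_inv_up, pv_inv_up_pure]
    obtain ⟨e1, g1⟩ := pv_memo_spec _ _ (pv_inv_up rest (v, c)).2 hxn i3 i2
    obtain ⟨e2, g2⟩ := pv_memo_spec fr.2.2 (pv_inv_up rest (v, c)).1 _ hhi i3 g1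
    refine ⟨?_, g2, ?_⟩
    · rw [e1, e2, i1]
    · rw [e1, e2]
      exact pv_combine_nonneg _ _ _ (pv_product_nonneg _ _ hxn i3)
        (pv_product_nonneg _ _ hhi i3)

-- ===== VERDICT (by name: the statement is the Claim_ definition above) =====
theorem nimber_inv_spec : Claim_equal_nimber_inv := by
  intro n _
  unfold Spec_nimber_inv nimber_inv nimber_inv_alt
  by_cases h : n ≤ 1
  · simp [nimber_inv_f, h]
  · simp only [if_neg h]
    obtain ⟨d1, d2, d3, d4, d5⟩ :=
      pv_inv_down_sim (n.toNat + 1) n PySem.Dict.empty (by omega) pv_cache_empty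
    obtain ⟨u1, _, _⟩ := pv_inv_up_sim (pv_inv_down (n.toNat + 1) n PySem.Dict.empty).2.1
      (pv_inv_down (n.toNat + 1) n PySem.Dict.empty).1
      (pv_inv_down (n.toNat + 1) n PySem.Dict.empty).2.2 d4 d3 d5
    rw [pv_inv_f_eq_pure (n.toNat + 1) n, ← d1, ← d2, ← u1]
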